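-- pv_equiv track=rewrite | github.com/a-dudek-ue/erwdlm_book | code_with_comments/chapter_6/sentiment.py | first_index_not_equal
-- ===== SOURCE A (Python) =====
-- def first_index_not_equal(list1, list2, ommited_nr=1):
--     _count = 0
--     for i, (x, y) in enumerate(zip(list1, list2)):
--         if (x != y) and (x == 1):
--             _count += 1
--             if (_count == ommited_nr):
--                 return i
--     return -1
-- ===== SOURCE B (Python) =====
-- def first_index_not_equal(list1, list2, ommited_nr=1):
--     # Jump directly to successive occurrences of 1 in list1 via list.index,
--     # checking list2 only at those positions.
--     limit = min(len(list1), len(list2))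
--     remaining = ommited_nr
--     start = 0
--     while remaining >= 1:
--         try:
--             i = list1.index(1, start)
--         except ValueError:
--             return -1
--         if i >= limit:
--             return -1
--         if list2[i] != 1:
--             remaining -= 1
--             if remaining == 0:
--                 return i
--         start = i + 1
--     return -1
-- ===== Notes on version B (the rewrite author's own statement) =====
-- stated objective: alternative
-- what changed: Instead of A's enumerate(zip) scan that tests every pair while counting, B repeatedly jumps to the next occurrence of 1 in list1 with list.index(1, start) and checks list2 only at those candidate positions, decrementing a remaining counter.
import Mathlib
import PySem

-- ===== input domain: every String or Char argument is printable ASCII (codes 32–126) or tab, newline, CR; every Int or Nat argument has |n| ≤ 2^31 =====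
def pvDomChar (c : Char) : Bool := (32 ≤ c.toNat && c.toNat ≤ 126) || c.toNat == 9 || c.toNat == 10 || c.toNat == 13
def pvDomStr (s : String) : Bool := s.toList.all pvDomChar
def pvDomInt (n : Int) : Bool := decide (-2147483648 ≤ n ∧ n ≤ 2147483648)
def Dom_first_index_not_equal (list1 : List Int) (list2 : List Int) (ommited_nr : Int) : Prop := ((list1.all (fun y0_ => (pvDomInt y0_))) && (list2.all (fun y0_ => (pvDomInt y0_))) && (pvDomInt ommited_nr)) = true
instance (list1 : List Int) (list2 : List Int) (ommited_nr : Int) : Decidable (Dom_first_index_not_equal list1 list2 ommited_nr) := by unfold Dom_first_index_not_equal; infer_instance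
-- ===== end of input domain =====

-- B finds the ommited_nr-th qualifying position by repeatedly jumping to the next
-- occurrence of 1 in list1 (list.index(1, start)) and checking list2 only there,
-- instead of A's enumerate(zip) scan over every pair; alternative algorithm, same cost.

-- ===== PORT A =====
-- the for-loop over enumerate(zip(list1, list2)) carrying _count, with early return
def fineLoopA (pairs : List (Int × Int)) (i : Int) (count : Int) (n : Int) : Int :=
  match pairs with
  | [] => -1
  | (x, y) :: t =>
    if x ≠ y ∧ x = 1 then
      (if count + 1 = n then i else fineLoopA t (i + 1) (count + 1) n)
    else fineLoopA t (i + 1) count n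

def first_index_not_equal (list1 : List Int) (list2 : List Int) (ommited_nr : Int) : Int :=
  fineLoopA (list1.zip list2) 0 0 ommited_nr

-- ===== PORT B =====
-- list1.index(1, start): first position ≥ start holding 1, none = ValueError
def findOneFrom (l : List Int) (start : Nat) : Option Nat :=
  (PySem.List.index? (l.drop start) 1).map (· + start)

-- needed by loopB's termination proof
lemma findOneFrom_bounds {l : List Int} {start i : Nat}
    (h : findOneFrom l start = some i) : start ≤ i ∧ i < l.length := by
  unfold findOneFrom at h
  obtain ⟨k, hk, hki⟩ := Option.map_eq_some_iff.mp h
  obtain ⟨hlt, -, -⟩ := PySem.List.getElem_of_index?_eq_some hk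
  rw [List.length_drop] at hlt
  omega

-- the while-loop of B: remaining/start state, jumping by list.index
def loopB (l1 l2 : List Int) (limit : Nat) (remaining : Int) (start : Nat) : Int :=
  if remaining ≥ 1 then
    match h : findOneFrom l1 start with
    | none => -1
    | some i =>
      if i ≥ limit then -1
      else if l2.getD i 0 ≠ 1 then   -- list2[i]: i < limit ≤ len(l2), in range, so getD is exact
        if remaining - 1 = 0 then (i : Int)
        else loopB l1 l2 limit (remaining - 1) (i + 1)
      else loopB l1 l2 limit remaining (i + 1)
  else -1
termination_by l1.length + 1 - start
decreasing_by
  · have := findOneFrom_bounds h; omega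
  · have := findOneFrom_bounds h; omega

def first_index_not_equal_alt (list1 : List Int) (list2 : List Int) (ommited_nr : Int) : Int :=
  loopB list1 list2 (min list1.length list2.length) ommited_nr 0

-- ===== PRECONDITION & SPEC =====
def Spec_first_index_not_equal (list1 : List Int) (list2 : List Int) (ommited_nr : Int) (out : Int) : Prop := out = first_index_not_equal_alt list1 list2 ommited_nr
instance (list1 : List Int) (list2 : List Int) (ommited_nr : Int) (out : Int) : Decidable (Spec_first_index_not_equal list1 list2 ommited_nr out) := by unfold Spec_first_index_not_equal; infer_instance

-- ===== CLAIM (what is proved, stated in full; the proofs are below) =====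
def Claim_equal_first_index_not_equal : Prop := ∀ (list1 : List Int) (list2 : List Int) (ommited_nr : Int), Dom_first_index_not_equal list1 list2 ommited_nr → Spec_first_index_not_equal list1 list2 ommited_nr (first_index_not_equal list1 list2 ommited_nr)

-- ===== LEMMAS AND PROOFS =====

-- the list of qualifying indices starting at index i
def idxsF (pairs : List (Int × Int)) (i : Int) : List Int :=
  (PySem.List.enumerate pairs i).filterMap
    (fun p => if p.2.1 = 1 ∧ p.2.1 ≠ p.2.2 then some p.1 else none)

-- select the k-th element (1-based) of xs, -1 out of range
def pick (xs : List Int) (k : Int) : Int :=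
  if 0 < k ∧ k ≤ (xs.length : Int) then PySem.List.pyGetD xs (k - 1) 0 else -1

-- the qualifying indices at or after position start
def sfx (l1 l2 : List Int) (start : Nat) : List Int :=
  idxsF ((l1.zip l2).drop start) (start : Int)

lemma idxsF_nil (i : Int) : idxsF [] i = [] := by
  simp [idxsF, PySem.List.enumerate_nil]

lemma idxsF_cons (x y : Int) (t : List (Int × Int)) (i : Int) :
    idxsF ((x, y) :: t) i =
      if x = 1 ∧ x ≠ y then i :: idxsF t (i + 1) else idxsF t (i + 1) := by
  simp only [idxsF, PySem.List.enumerate_cons, List.filterMap_cons]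
  by_cases hx : x = 1
  · subst hx
    by_cases hy : (1 : Int) = y <;> simp [hy]
  · simp [hx]

lemma pick_nil (k : Int) : pick [] k = -1 := by
  simp only [pick, List.length_nil]
  split_ifs with h
  · omega
  · rfl

lemma pick_nonpos (xs : List Int) (k : Int) (hk : k ≤ 0) : pick xs k = -1 := by
  simp only [pick]
  rw [if_neg (by omega)]

lemma pick_cons_one (a : Int) (rest : List Int) : pick (a :: rest) 1 = a := by
  simp only [pick, List.length_cons]
  have hc : (0 : Int) < 1 ∧ (1 : Int) ≤ ((rest.length + 1 : Nat) : Int) :=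
    ⟨by norm_num, by push_cast; omega⟩
  rw [if_pos hc]
  norm_num [PySem.List.pyGetD_zero_cons]

lemma pick_cons_ne (a : Int) (rest : List Int) (k : Int) (h : k ≠ 1) :
    pick (a :: rest) k = pick rest (k - 1) := by
  simp only [pick, List.length_cons]
  by_cases h2 : 0 < k ∧ k ≤ ((rest.length + 1 : Nat) : Int)
  · have hk2 : 2 ≤ k := by omega
    rw [if_pos (by push_cast at h2 ⊢; omega), if_pos (by push_cast at h2 ⊢; omega)]
    have e1 : k - 1 = (((k - 1).toNat : Nat) : Int) := by omega
    have e2 : k - 1 - 1 = (((k - 1 - 1).toNat : Nat) : Int) := by omega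
    rw [e2, e1, PySem.List.pyGetD_natCast, PySem.List.pyGetD_natCast]
    have ht : (k - 1).toNat = (k - 1 - 1).toNat + 1 := by omega
    simp only [ht, List.getD_cons_succ]
    have : (((k - 1 - 1).toNat + 1 : Nat) : Int) - 1 = (((k - 1 - 1).toNat : Nat) : Int) := by omega
    rw [this]
    simp
  · rw [if_neg (by push_cast at h2 ⊢; omega), if_neg (by push_cast at h2 ⊢; omega)]

lemma fineLoopA_eq_pick (pairs : List (Int × Int)) (n : Int) :
    ∀ (i c : Int), fineLoopA pairs i c n = pick (idxsF pairs i) (n - c) := by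
  induction pairs with
  | nil => intro i c; simp [fineLoopA, idxsF_nil, pick_nil]
  | cons p t ih =>
    obtain ⟨x, y⟩ := p
    intro i c
    rw [idxsF_cons]
    by_cases h : x = 1 ∧ x ≠ y
    · have h' : x ≠ y ∧ x = 1 := ⟨h.2, h.1⟩
      simp only [fineLoopA, if_pos h, if_pos h']
      by_cases he : c + 1 = n
      · rw [if_pos he]
        have : n - c = 1 := by omega
        rw [this, pick_cons_one]
      · rw [if_neg he, ih]
        rw [pick_cons_ne _ _ _ (by omega)]
        congr 1
        omega
    · have h' : ¬ (x ≠ y ∧ x = 1) := fun hh => h ⟨hh.2, hh.1⟩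
      simp only [fineLoopA, if_neg h, if_neg h']
      exact ih (i + 1) c

lemma sfx_big (l1 l2 : List Int) (start : Nat)
    (h : (l1.zip l2).length ≤ start) : sfx l1 l2 start = [] := by
  rw [sfx, List.drop_eq_nil_of_le h, idxsF_nil]

lemma sfx_step (l1 l2 : List Int) (start : Nat) (h : start < (l1.zip l2).length) :
    sfx l1 l2 start =
      if l1[start]'(by rw [List.length_zip] at h; omega) = 1 ∧
         l1[start]'(by rw [List.length_zip] at h; omega) ≠
           l2[start]'(by rw [List.length_zip] at h; omega)
      then (start : Int) :: sfx l1 l2 (start + 1) else sfx l1 l2 (start + 1) := by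
  have hd : (l1.zip l2).drop start = (l1.zip l2)[start] :: (l1.zip l2).drop (start + 1) :=
    List.drop_eq_getElem_cons h
  have hz : (l1.zip l2)[start]'h =
      (l1[start]'(by rw [List.length_zip] at h; omega),
       l2[start]'(by rw [List.length_zip] at h; omega)) := List.getElem_zip
  rw [sfx, hd, hz, idxsF_cons]
  rfl

-- no 1 in list1 on [start, start+d) ⇒ no qualifying index there
lemma sfx_skip (l1 l2 : List Int) (d : Nat) : ∀ (start : Nat),
    (∀ j (hj : j < l1.length), start ≤ j → j < start + d → l1[j] ≠ 1) →
    sfx l1 l2 start = sfx l1 l2 (start + d) := by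
  induction d with
  | zero => intro start _; rfl
  | succ d ih =>
    intro start hno
    by_cases hlt : start < (l1.zip l2).length
    · have hl1 : start < l1.length := by rw [List.length_zip] at hlt; omega
      rw [sfx_step l1 l2 start hlt,
        if_neg (by intro hq; exact hno start hl1 (le_refl _) (by omega) hq.1)]
      have := ih (start + 1) (fun j hj h1 h2 => hno j hj (by omega) (by omega))
      rw [this]; congr 1; omega
    · rw [sfx_big l1 l2 start (by omega), sfx_big l1 l2 (start + (d + 1)) (by omega)]

lemma getElem_drop_sub {l : List Int} {start j : Nat} (hsj : start ≤ j) (hj : j < l.length) :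
    (l.drop start)[j - start]'(by rw [List.length_drop]; omega) = l[j] := by
  have hd : j - start < (l.drop start).length := by rw [List.length_drop]; omega
  have h1 : (l.drop start)[j - start]? = l[j]? := by
    rw [List.getElem?_drop]
    congr 1
    omega
  rw [List.getElem?_eq_getElem hd, List.getElem?_eq_getElem hj] at h1
  exact Option.some.inj h1

lemma findOneFrom_none {l : List Int} {start : Nat}
    (h : findOneFrom l start = none) :
    ∀ j (hj : j < l.length), start ≤ j → l[j] ≠ 1 := by
  unfold findOneFrom at h
  rw [Option.map_eq_none_iff, PySem.List.index?_eq_none_iff] at h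
  intro j hj hsj he
  apply h
  rw [List.mem_iff_getElem]
  exact ⟨j - start, by rw [List.length_drop]; omega, by rw [getElem_drop_sub hsj hj]; exact he⟩

lemma findOneFrom_some {l : List Int} {start i : Nat}
    (h : findOneFrom l start = some i) :
    ∃ (hi : i < l.length), l[i] = 1 ∧ ∀ j (hj : j < l.length), start ≤ j → j < i → l[j] ≠ 1 := by
  unfold findOneFrom at h
  obtain ⟨k, hk, hki⟩ := Option.map_eq_some_iff.mp h
  obtain ⟨hlt, heq, hbefore⟩ := PySem.List.getElem_of_index?_eq_some hk
  rw [List.length_drop] at hlt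
  have hi : i < l.length := by omega
  refine ⟨hi, ?_, ?_⟩
  · have h2 : l[i]? = some 1 := by
      rw [show i = start + k by omega, ← List.getElem?_drop,
        List.getElem?_eq_getElem (show k < (l.drop start).length by rw [List.length_drop]; omega)]
      exact congrArg some heq
    have h4 := List.getElem?_eq_getElem hi
    rw [h2] at h4
    exact (Option.some.inj h4.symm)
  · intro j hj hsj hji hje
    exact hbefore (j - start) (by omega) (by rw [getElem_drop_sub hsj hj]; exact hje)

lemma loopB_eq_pick (l1 l2 : List Int) :
    ∀ (μ start : Nat), l1.length + 1 - start ≤ μ →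
    ∀ (n : Int), loopB l1 l2 (min l1.length l2.length) n start = pick (sfx l1 l2 start) n := by
  intro μ
  induction μ with
  | zero =>
    intro start hμ n
    have hstart : l1.length < start := by omega
    have hnone : findOneFrom l1 start = none := by
      unfold findOneFrom
      rw [List.drop_eq_nil_of_le (by omega)]
      rfl
    rw [loopB]
    rw [sfx_big l1 l2 start (by rw [List.length_zip]; omega)]
    by_cases hn : n ≥ 1
    · rw [if_pos hn]
      split
      · rw [pick_nil]
      · rename_i i hfo
        rw [hnone] at hfo
        exact absurd hfo (by simp)
    · rw [if_neg hn, pick_nil]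
  | succ μ ih =>
    intro start hμ n
    rw [loopB]
    by_cases hn : n ≥ 1
    swap
    · rw [if_neg hn, pick_nonpos _ _ (by omega)]
    rw [if_pos hn]
    split
    · rename_i hfo
      have hno := findOneFrom_none hfo
      have : sfx l1 l2 start = sfx l1 l2 (start + l1.length) :=
        sfx_skip l1 l2 l1.length start (fun j hj h1 _ => hno j hj h1)
      rw [this, sfx_big l1 l2 _ (by rw [List.length_zip]; omega), pick_nil]
    · rename_i i hfo
      obtain ⟨hsi, hil⟩ := findOneFrom_bounds hfo
      obtain ⟨hi, h1i, hbefore⟩ := findOneFrom_some hfo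
      have hskip : sfx l1 l2 start = sfx l1 l2 i := by
        have := sfx_skip l1 l2 (i - start) start
          (fun j hj h1 h2 => hbefore j hj h1 (by omega))
        rw [this, show start + (i - start) = i by omega]
      by_cases hlim : i ≥ min l1.length l2.length
      · rw [if_pos hlim, hskip, sfx_big l1 l2 i (by rw [List.length_zip]; omega), pick_nil]
      rw [if_neg hlim]
      have hzl : i < (l1.zip l2).length := by rw [List.length_zip]; omega
      have hi2 : i < l2.length := by omega
      have hgd : l2.getD i 0 = l2[i] := List.getD_eq_getElem l2 0 hi2
      by_cases hq : l2[i]'hi2 = 1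
      · have hc1 : ¬ (l2.getD i 0 ≠ 1) := by rw [hgd]; simp [hq]
        rw [if_neg hc1, hskip, sfx_step l1 l2 i hzl]
        have hc2 : ¬ (l1[i]'hi = 1 ∧ l1[i]'hi ≠ l2[i]'hi2) := fun hc => hc.2 (by rw [h1i, hq])
        rw [if_neg hc2]
        exact ih (i + 1) (by omega) n
      · have hc1 : l2.getD i 0 ≠ 1 := by rw [hgd]; exact hq
        rw [if_pos hc1, hskip, sfx_step l1 l2 i hzl]
        have hc2 : l1[i]'hi = 1 ∧ l1[i]'hi ≠ l2[i]'hi2 :=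
          ⟨h1i, by rw [h1i]; exact fun he => hq he.symm⟩
        rw [if_pos hc2]
        by_cases hone : n - 1 = 0
        · rw [if_pos hone, show n = 1 by omega, pick_cons_one]
        · rw [if_neg hone, ih (i + 1) (by omega) (n - 1),
            pick_cons_ne _ _ _ (by omega)]

-- ===== VERDICT (by name: the statement is the Claim_ definition above) =====
theorem first_index_not_equal_spec : Claim_equal_first_index_not_equal := by
  intro list1 list2 n _
  show first_index_not_equal list1 list2 n = first_index_not_equal_alt list1 list2 n
  rw [first_index_not_equal, fineLoopA_eq_pick, first_index_not_equal_alt,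
    loopB_eq_pick list1 list2 (list1.length + 1) 0 (by omega) n]
  simp only [sfx, List.drop_zero, Nat.cast_zero, Int.sub_zero]
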